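-- pv_equiv track=rewrite | github.com/doszilab/pathogenic-idr-analysis | src/processing_data/elm/generate_files/enrichment_test_for_motifs.py | split_into_continuous_regions
-- ===== SOURCE A (Python) =====
-- def split_into_continuous_regions(position_list):
--     if not position_list:
--         return []
--     sorted_pos = sorted(position_list)
--     regions = [[sorted_pos[0]]]
--     for pos in sorted_pos[1:]:
--         if pos == regions[-1][-1] + 1:
--             regions[-1].append(pos)
--         else:
--             regions.append([pos])
--     return regions
-- ===== SOURCE B (Python) =====
-- def split_into_continuous_regions(position_list):
--     regions = []
--     run = []
--     for pos in reversed(sorted(position_list)):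
--         if run and pos + 1 == run[-1]:
--             run.append(pos)
--         else:
--             if run:
--                 run.reverse()
--                 regions.append(run)
--             run = [pos]
--     if run:
--         run.reverse()
--         regions.append(run)
--     regions.reverse()
--     return regions
-- ===== Notes on version B (the rewrite author's own statement) =====
-- stated objective: alternative
-- what changed: B builds the region list back-to-front: it scans the sorted positions in reverse order, accumulates the current run in descending order and closes/reverses it at each break, finally reversing the region list, instead of A's forward scan that appends to the last region of a growing list.
import Mathlib
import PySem

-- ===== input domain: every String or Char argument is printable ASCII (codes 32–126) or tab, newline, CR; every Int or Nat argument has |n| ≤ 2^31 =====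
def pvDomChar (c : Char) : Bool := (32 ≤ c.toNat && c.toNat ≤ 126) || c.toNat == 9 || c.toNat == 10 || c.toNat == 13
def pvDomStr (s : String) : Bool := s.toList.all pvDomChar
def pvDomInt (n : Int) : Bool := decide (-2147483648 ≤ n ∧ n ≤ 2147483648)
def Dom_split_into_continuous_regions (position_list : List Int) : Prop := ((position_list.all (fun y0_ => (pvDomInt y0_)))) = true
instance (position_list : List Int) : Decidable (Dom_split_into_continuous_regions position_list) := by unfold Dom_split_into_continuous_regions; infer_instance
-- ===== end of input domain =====

-- B builds the region list back-to-front: it scans the sorted positions in reverse, accumulates the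
-- current run in descending order and reverses run/region lists at the boundaries; alternative, same cost.


-- ===== PORT A =====
-- the for-loop over the tail of sorted_pos; the last region and its last element are read with getLast?.getD,
-- exact because the loop invariant keeps regions and its last region nonempty
def pvALoop (regions : List (List Int)) : List Int → List (List Int)
  | [] => regions
  | pos :: rest =>
    if pos = ((regions.getLast?.getD []).getLast?.getD 0) + 1 then
      pvALoop (regions.dropLast ++ [(regions.getLast?.getD []) ++ [pos]]) rest
    else
      pvALoop (regions ++ [[pos]]) rest

def split_into_continuous_regions (position_list : List Int) : List (List Int) :=
  if position_list = [] then []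
  else
    -- head and tail of sorted_pos read off by the match (sorted_pos is nonempty here)
    match PySem.List.sorted position_list (fun x => x) false with
    | [] => []
    | p0 :: rest => pvALoop [[p0]] rest

-- ===== PORT B =====
-- one step of B's loop body over the state (regions, run); run's last element is read with getLast?.getD,
-- exact because the branch that reads it first checks run ≠ []
def pvBStep (st : List (List Int) × List Int) (pos : Int) : List (List Int) × List Int :=
  if st.2 ≠ [] ∧ pos + 1 = st.2.getLast?.getD 0 then
    (st.1, st.2 ++ [pos])
  else
    ((if st.2 = [] then st.1 else st.1 ++ [st.2.reverse]), [pos])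

-- B's code after the loop: flush the pending run, then reverse the region list
def pvBFinish (st : List (List Int) × List Int) : List (List Int) :=
  (if st.2 = [] then st.1 else st.1 ++ [st.2.reverse]).reverse

def split_into_continuous_regions_alt (position_list : List Int) : List (List Int) :=
  pvBFinish (((PySem.List.sorted position_list (fun x => x) false).reverse).foldl pvBStep ([], []))

-- ===== PRECONDITION & SPEC =====
def Spec_split_into_continuous_regions (position_list : List Int) (out : List (List Int)) : Prop := out = split_into_continuous_regions_alt position_list
instance (position_list : List Int) (out : List (List Int)) : Decidable (Spec_split_into_continuous_regions position_list out) := by unfold Spec_split_into_continuous_regions; infer_instance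

-- ===== CLAIM (what is proved, stated in full; the proofs are below) =====
def Claim_equal_split_into_continuous_regions : Prop := ∀ (position_list : List Int), Dom_split_into_continuous_regions position_list → Spec_split_into_continuous_regions position_list (split_into_continuous_regions position_list)

-- ===== LEMMAS AND PROOFS =====

-- the "rest of the computation" of A's loop, given the current (nonempty) last region r
def pvExt (r : List Int) : List Int → List (List Int)
  | [] => [r]
  | y :: ys => if y = r.getLast?.getD 0 + 1 then pvExt (r ++ [y]) ys else r :: pvExt [y] ys

theorem pvALoop_eq (rest : List Int) : ∀ (rs : List (List Int)) (r : List Int),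
    pvALoop (rs ++ [r]) rest = rs ++ pvExt r rest := by
  induction rest with
  | nil => intro rs r; simp [pvALoop, pvExt]
  | cons y rest ih =>
    intro rs r
    simp only [pvALoop, pvExt, List.getLast?_concat, Option.getD_some, List.dropLast_concat]
    split_ifs with h
    · exact ih rs (r ++ [y])
    · have := ih (rs ++ [r]) [y]
      simpa using this

theorem pvExt_cons (ys : List Int) : ∀ (a : Int) (r : List Int), r ≠ [] →
    ∃ g gs, pvExt r ys = g :: gs ∧ pvExt (a :: r) ys = (a :: g) :: gs := by
  induction ys with
  | nil => intro a r _; exact ⟨r, [], rfl, rfl⟩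
  | cons y ys ih =>
    intro a r hr
    match r with
    | b :: r' =>
      simp only [pvExt, List.getLast?_cons_cons]
      split_ifs with h
      · have := ih a ((b :: r') ++ [y]) (by simp)
        simpa using this
      · exact ⟨b :: r', pvExt [y] ys, rfl, rfl⟩

theorem pvBStep_shape (st : List (List Int) × List Int) (pos : Int) :
    ∃ run', pvBStep st pos = ((pvBStep st pos).1, run' ++ [pos]) := by
  unfold pvBStep
  split_ifs with h1 h2 <;> first | exact ⟨st.2, rfl⟩ | exact ⟨[], rfl⟩

theorem pvChunks_eq_ext (xs : List Int) : ∀ (x : Int),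
    pvBFinish (List.foldr (fun pos st => pvBStep st pos) ([], []) (x :: xs)) = pvExt [x] xs := by
  induction xs with
  | nil => intro x; simp [pvBStep, pvBFinish, pvExt]
  | cons y ys ih =>
    intro x
    obtain ⟨run', hshape⟩ :=
      pvBStep_shape (List.foldr (fun pos st => pvBStep st pos) ([], []) ys) y
    set s := List.foldr (fun pos st => pvBStep st pos) ([], []) (y :: ys) with hs
    have hs2 : s = (s.1, run' ++ [y]) := by
      rw [hs]; show pvBStep _ y = _; rw [hshape]; rfl
    have hyshape : pvExt [y] ys = (y :: run'.reverse) :: s.1.reverse := by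
      rw [← ih y, ← hs]
      rw [pvBFinish, hs2]
      simp
    show pvBFinish (pvBStep s x) = pvExt [x] (y :: ys)
    simp only [pvExt, List.getLast?_singleton, Option.getD_some]
    by_cases h : y = x + 1
    · obtain ⟨g, gs', hg, hag⟩ := pvExt_cons ys x [y] (by simp)
      rw [hyshape] at hg
      cases hg
      subst h
      have hstep : pvBStep s x = (s.1, (run' ++ [x + 1]) ++ [x]) := by
        rw [pvBStep, hs2]; simp
      rw [hstep, pvBFinish]
      simp [hag]
    · have hstep : pvBStep s x = (s.1 ++ [(run' ++ [y]).reverse], [x]) := by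
        rw [pvBStep, hs2]
        have h' : ¬ (x + 1 = y) := fun hc => h hc.symm
        simp [h']
      rw [hstep, pvBFinish, if_neg h]
      simp [hyshape]

-- ===== VERDICT (by name: the statement is the Claim_ definition above) =====
theorem split_into_continuous_regions_spec : Claim_equal_split_into_continuous_regions := by
  intro position_list _
  unfold Spec_split_into_continuous_regions
  unfold split_into_continuous_regions split_into_continuous_regions_alt
  rw [List.foldl_reverse]
  by_cases hpl : position_list = []
  · subst hpl; rfl
  · simp only [hpl, if_false]
    cases hs : PySem.List.sorted position_list (fun x => x) false with
    | nil => exact absurd ((PySem.List.sorted_eq_nil_iff _ _ _).mp hs) hpl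
    | cons p0 rest =>
      show pvALoop [[p0]] rest =
        pvBFinish (List.foldr (fun x y => pvBStep y x) ([], []) (p0 :: rest))
      have h1 : pvALoop ([] ++ [[p0]]) rest = [] ++ pvExt [p0] rest := pvALoop_eq rest [] [p0]
      simp only [List.nil_append] at h1
      rw [h1, ← pvChunks_eq_ext rest p0]
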